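-- pv_equiv track=rewrite | github.com/jamps3/Ohjelmoinnin-Perusteet-Python | osa04-25_naapureita_listassa/src/naapureita_listassa.py | pisin_naapurijono
-- ===== SOURCE A (Python) =====
-- def pisin_naapurijono(lista):
--     if not lista:
--         return []
--
--     longest = []
--     current = [lista[0]]
--
--     for i in range(1, len(lista)):
--         if lista[i] == lista[i-1] + 1 or lista[i] == lista[i-1] - 1:
--             current.append(lista[i])
--         else:
--             if len(current) > len(longest):
--                 longest = current
--             current = [lista[i]]
--
--     if len(current) > len(longest):
--         longest = current
--
--     return len(longest)
-- ===== SOURCE B (Python) =====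
-- def pisin_naapurijono(lista):
--     if not lista:
--         return []
--     # adjacency table: links[i] is True iff lista[i] and lista[i+1] differ by exactly 1
--     links = [abs(lista[i + 1] - lista[i]) == 1 for i in range(len(lista) - 1)]
--     best = run = 0
--     for link in links:
--         run = run + 1 if link else 0
--         best = max(best, run)
--     return best + 1
-- ===== Notes on version B (the rewrite author's own statement) =====
-- stated objective: alternative
-- what changed: B splits the task into two phases: it first materialises a boolean adjacency table links[i] = (|lista[i+1]-lista[i]| == 1) and then scans it for the longest run of True, tracking only two integer counters (best, run) and returning best+1, instead of A's fused single pass that accumulates and compares explicit list slices (current/longest) and measures their lengths.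
-- outside the precondition, e.g. on pisin_naapurijono([]): A returns [], B returns []
import Mathlib
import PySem

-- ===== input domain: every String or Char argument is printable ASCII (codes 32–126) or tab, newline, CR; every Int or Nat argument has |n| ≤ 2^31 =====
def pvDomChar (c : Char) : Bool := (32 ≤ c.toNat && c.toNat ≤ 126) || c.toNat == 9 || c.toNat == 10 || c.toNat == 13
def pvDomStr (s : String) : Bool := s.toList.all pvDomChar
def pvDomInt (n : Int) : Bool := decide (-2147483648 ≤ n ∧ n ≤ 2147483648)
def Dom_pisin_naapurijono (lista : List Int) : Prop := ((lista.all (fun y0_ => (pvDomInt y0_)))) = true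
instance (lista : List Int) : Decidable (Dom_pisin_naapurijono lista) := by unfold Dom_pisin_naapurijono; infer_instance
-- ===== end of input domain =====

-- B re-decomposes A's fused list-slice pass into an adjacency table plus a longest-true-run
-- counter scan (objective: alternative); equivalence is claimed for nonempty lists (Pre_).

-- ===== PORT A =====
-- On [] Python A returns [] (a list, not an int): no Int value exists; excluded by Pre_.
def pisin_naapurijono (lista : List Int) : Int :=
  if lista = [] then 0
  else
    let st := (PySem.List.pyRange 1 (lista.length : Int) 1).foldl
      (fun (st : List Int × List Int) i =>
        let xi := PySem.List.pyGetD lista i 0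
        let xp := PySem.List.pyGetD lista (i - 1) 0
        if xi = xp + 1 ∨ xi = xp - 1 then (st.1, st.2 ++ [xi])
        else if st.2.length > st.1.length then (st.2, [xi])
        else (st.1, [xi]))
      (([] : List Int), [PySem.List.pyGetD lista 0 0])
    if st.2.length > st.1.length then (st.2.length : Int) else (st.1.length : Int)

-- ===== PORT B =====
-- On [] Source B returns [] (not an int): no Int value exists; excluded by Pre_.
def pisin_naapurijono_alt (lista : List Int) : Int :=
  if lista = [] then 0
  else
    let links := (PySem.List.pyRange 0 ((lista.length : Int) - 1) 1).map
      (fun i => (PySem.List.pyGetD lista (i + 1) 0 - PySem.List.pyGetD lista i 0).natAbs == 1)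
    let st := links.foldl
      (fun (st : Int × Int) link =>
        let run := if link then st.2 + 1 else 0
        (max st.1 run, run))
      ((0 : Int), (0 : Int))
    st.1 + 1

-- ===== PRECONDITION & SPEC =====
-- Pre_ excludes only the empty list, on which Python A returns [] — a list, not an int,
-- so it has no value of the declared return type Int.
def Pre_pisin_naapurijono (lista : List Int) : Prop := lista ≠ []
instance (lista : List Int) : Decidable (Pre_pisin_naapurijono lista) := by
  unfold Pre_pisin_naapurijono; infer_instance

def pvWitness_pisin_naapurijono : List Int := [3, 4, 5, 9, 8, 1]

def Spec_pisin_naapurijono (lista : List Int) (out : Int) : Prop := out = pisin_naapurijono_alt lista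
instance (lista : List Int) (out : Int) : Decidable (Spec_pisin_naapurijono lista out) := by unfold Spec_pisin_naapurijono; infer_instance

-- ===== CLAIM (what is proved, stated in full; the proofs are below) =====
def Claim_equal_pisin_naapurijono : Prop := ∀ (lista : List Int), Dom_pisin_naapurijono lista → Pre_pisin_naapurijono lista → Spec_pisin_naapurijono lista (pisin_naapurijono lista)

-- ===== LEMMAS AND PROOFS =====

-- Loop invariant: A's (longest, current) slices and B's (best, run) counters walk the same
-- index list; current's length is run+1 and max(|longest|,|current|) is best+1 throughout.
theorem run_inv (xs : List Int) (R : List Nat) :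
    ∀ (L C : List Int) (b r : Int), 0 ≤ r → (C.length : Int) = r + 1 →
    ((max L.length C.length : Nat) : Int) = b + 1 →
    (let F := R.foldl
        (fun (st : List Int × List Int) (k : Nat) =>
          let xi := PySem.List.pyGetD xs (1 + (k : Int)) 0
          let xp := PySem.List.pyGetD xs (1 + (k : Int) - 1) 0
          if xi = xp + 1 ∨ xi = xp - 1 then (st.1, st.2 ++ [xi])
          else if st.2.length > st.1.length then (st.2, [xi])
          else (st.1, [xi])) (L, C);
     let G := R.foldl
        (fun (st : Int × Int) (k : Nat) =>
          let run := if (PySem.List.pyGetD xs ((k : Int) + 1) 0 - PySem.List.pyGetD xs (k : Int) 0).natAbs == 1 then st.2 + 1 else 0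
          (max st.1 run, run)) (b, r);
     ((max F.1.length F.2.length : Nat) : Int) = G.1 + 1) := by
  induction R with
  | nil => intro L C b r hr hC hM; simpa using hM
  | cons k R ih =>
    intro L C b r hr hC hM
    simp only [List.foldl_cons]
    have hidx : 1 + (k : Int) - 1 = (k : Int) := by ring
    have hidx2 : 1 + (k : Int) = (k : Int) + 1 := by ring
    rw [hidx, hidx2]
    set xp := PySem.List.pyGetD xs (k : Int) 0 with hxp
    set xi := PySem.List.pyGetD xs ((k : Int) + 1) 0 with hxi
    by_cases h : xi = xp + 1 ∨ xi = xp - 1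
    · have hb : ((xi - xp).natAbs == 1) = true := by
        simp only [beq_iff_eq]; omega
      rw [if_pos h]
      simp only [hb, if_true]
      apply ih
      · omega
      · push_cast [List.length_append, List.length_singleton] at hC ⊢; omega
      · push_cast [List.length_append, List.length_singleton] at hM hC ⊢; omega
    · have hb : ((xi - xp).natAbs == 1) = false := by
        simp only [beq_eq_false_iff_ne, ne_eq]
        omega
      rw [if_neg h]
      simp only [hb, Bool.false_eq_true, if_false]
      have hb0 : 0 ≤ b := by push_cast at hM; omega
      have hmax0 : max b 0 = b := by omega
      rw [hmax0]
      split_ifs with hlen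
      · apply ih
        · omega
        · simp
        · push_cast [List.length_singleton] at hM hC ⊢; omega
      · apply ih
        · omega
        · simp
        · push_cast [List.length_singleton] at hM hC ⊢; omega

-- ===== VERDICT (by name: the statement is the Claim_ definition above) =====
theorem pisin_naapurijono_spec : Claim_equal_pisin_naapurijono := by
  intro lista _ hpre
  unfold Spec_pisin_naapurijono pisin_naapurijono pisin_naapurijono_alt
  rw [if_neg hpre, if_neg hpre]
  simp only [PySem.List.pyRange_one, sub_zero, List.foldl_map, List.map_map, Function.comp_def, zero_add]
  have hgoal := run_inv lista (List.range ((lista.length : Int) - 1).toNat) [] [PySem.List.pyGetD lista 0 0] 0 0 le_rfl (by simp) (by simp)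
  simp only [gt_iff_lt] at hgoal ⊢
  split_ifs with h
  · rw [Nat.max_eq_right h.le] at hgoal; exact hgoal
  · rw [Nat.max_eq_left (Nat.le_of_not_lt h)] at hgoal; exact hgoal
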